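-- pv_equiv track=rewrite | github.com/maximlt/qgis-interpolate_missing_z_line | interpolate_missing_z_on_line.py | fill_list_ends
-- ===== SOURCE A (Python) =====
-- def idx_first_last_valid_items(list_, invalid_item):
--     """Determine the indexes of the first and last valid items in a sequence.
--
--     Parameters
--     ----------
--     list_ : list
--         A list whose one or both ends has invalid items.
--     invalid_item : float
--         Invalid item that needs to be replaced (eg. 0).
--
--     Returns
--     -------
--     tuple
--         Two elements:
--             - int: first valid item
--             - int: last valid item
--
--     Usage
--     -----
--     >>> idx_first_last_valid_items([0, 0, 1, 0, 2, 0], 0)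
--     (2, 4)
--     >>> idx_first_last_valid_items([1, 1, 1], 0)
--     (0, 2)
--     """
--     if list_[0] != invalid_item:
--         idx_first_valid_item = 0
--     else:
--         for idx, e in enumerate(list_):
--             if e == invalid_item:
--                 continue
--             idx_first_valid_item = idx
--             break
--     if list_[-1] != invalid_item:
--         idx_last_valid_item = len(list_) - 1
--     else:
--         for idx, e in enumerate(reversed(list_)):
--             if e == invalid_item:
--                 continue
--             idx_last_valid_item = len(list_) - idx - 1
--             break
--     return idx_first_valid_item, idx_last_valid_item
--
-- def fill_list_ends(list_, invalid_item):
--     """Fill the ends of a list with the first/last valid item found.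
--
--     Parameters
--     ----------
--     list_ : list
--         A list whose one or both ends has invalid items.
--     invalid_item : float
--         Invalid item that needs to be replaced (eg. 0).
--
--     Returns
--     -------
--     tuple
--         Two elements:
--             - list: Original list with filled ends
--             - int: Number of filled items.
--
--     Usage
--     -----
--     >>> fill_list_ends([0, 0, 1, 0, 2, 0], 0)
--     ([1, 1, 1, 0, 2, 2], 3)
--     >>> fill_list_ends([0, 0, 0], 0)
--     None
--     >>> fill_list_ends([1, 1, 1], 0)
--     ([1, 1, 1], 0)
--     """
--     # All the items are invalid, we don't know how to fill the new list.
--     if all(e == invalid_item for e in list_):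
--         return None
--     # These is no invalid item, return the original list.
--     if invalid_item not in list_:
--         return list_, 0
--     idx_first_valid_item, idx_last_valid_item = idx_first_last_valid_items(list_, invalid_item)
--     new_list = list_.copy()
--     for i in range(len(list_)):
--         # Fill the new list ends with the valid items.
--         if i < idx_first_valid_item:
--             new_list[i] = list_[idx_first_valid_item]
--         if i > idx_last_valid_item:
--             new_list[i] = list_[idx_last_valid_item]
--     no_filled_item = len(list_) - idx_last_valid_item - 1 + idx_first_valid_item
--     return new_list, no_filled_item
-- ===== SOURCE B (Python) =====
-- def _fill_front(lst, invalid_item):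
--     """Single forward pass: count leading invalids until the first valid item,
--     then emit that item replicated over the leading run and copy the rest.
--
--     Returns (filled list, number of replaced items), or None if no item is valid.
--     """
--     out = []
--     pending = 0
--     for e in lst:
--         if out:
--             out.append(e)
--         elif e != invalid_item:
--             out = [e] * (pending + 1)
--         else:
--             pending += 1
--     if not out:
--         return None
--     return out, pending
--
-- def fill_list_ends(list_, invalid_item):
--     """Fill the ends of a list with the first/last valid item found.
--
--     One-ended single-pass fill applied to both ends via reversal; no index
--     arithmetic, no copy-and-overwrite loop.
--     """
--     front = _fill_front(list_, invalid_item)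
--     if front is None:
--         return None
--     f, kf = front
--     b, kb = _fill_front(f[::-1], invalid_item)
--     return b[::-1], kf + kb
-- ===== Notes on version B (the rewrite author's own statement) =====
-- stated objective: alternative
-- what changed: Replaces A's guard-plus-index pipeline (all/in guards, separate first/last index search, copy-then-overwrite loop over range(len)) with a single-pass one-ended state-machine fill (_fill_front: accumulator list plus pending counter over the elements, no indices) applied to the front and, via reversal, to the back; the counts are the two pending counters.
import Mathlib
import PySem

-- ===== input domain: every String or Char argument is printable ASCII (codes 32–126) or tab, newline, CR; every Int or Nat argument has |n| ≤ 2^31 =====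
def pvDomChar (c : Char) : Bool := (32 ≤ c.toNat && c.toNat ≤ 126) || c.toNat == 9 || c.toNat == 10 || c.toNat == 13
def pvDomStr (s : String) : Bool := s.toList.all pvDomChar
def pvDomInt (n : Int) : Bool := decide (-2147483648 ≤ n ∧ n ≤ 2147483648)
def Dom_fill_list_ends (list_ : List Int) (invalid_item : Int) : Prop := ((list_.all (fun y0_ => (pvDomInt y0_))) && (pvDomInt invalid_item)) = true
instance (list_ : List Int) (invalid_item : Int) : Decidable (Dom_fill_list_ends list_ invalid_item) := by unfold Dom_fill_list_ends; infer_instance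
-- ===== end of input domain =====

-- B replaces A's guards + index search + copy-and-overwrite loop by a single-pass one-ended
-- state-machine fill applied to the front and (via reversal) the back; objective: alternative.
-- No argument is mutated.

-- ===== PORT A =====
-- 'for idx, e in enumerate(...): if e == invalid: continue; idx_… = idx; break' — returns the
-- index where the loop breaks; none = the loop ends without setting the variable (in A this
-- path is unreachable: the helper is only called when a valid item exists).
def pvScanValid (invalid_item : Int) : List Int → Nat → Option Nat
  | [], _ => none
  | e :: rest, idx =>
      if e == invalid_item then pvScanValid invalid_item rest (idx + 1) else some idx

def idx_first_last_valid_items (list_ : List Int) (invalid_item : Int) : Int × Int :=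
  -- list_[0] / list_[-1]: the .getD invalid_item default covers only the empty list, on which
  -- Python would raise IndexError — unreachable from fill_list_ends (the 'all' guard fires first).
  let idx_first_valid_item : Int :=
    if (PySem.List.pyGet? list_ 0).getD invalid_item ≠ invalid_item then 0
    else ((pvScanValid invalid_item list_ 0).getD 0 : Nat)
  let idx_last_valid_item : Int :=
    if (PySem.List.pyGet? list_ (-1)).getD invalid_item ≠ invalid_item then (list_.length : Int) - 1
    else (list_.length : Int) - ((pvScanValid invalid_item list_.reverse 0).getD 0 : Nat) - 1
  (idx_first_valid_item, idx_last_valid_item)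

def fill_list_ends (list_ : List Int) (invalid_item : Int) : Option (List Int × Int) :=
  if list_.all (fun e => e == invalid_item) then none
  else if list_.contains invalid_item = false then some (list_, 0)
  else
    let p := idx_first_last_valid_items list_ invalid_item
    -- list_[idx_first_valid_item] / list_[idx_last_valid_item]: always in range here
    let vf := (PySem.List.pyGet? list_ p.1).getD 0
    let vl := (PySem.List.pyGet? list_ p.2).getD 0
    let new_list := (List.range list_.length).foldl (fun acc (i : Nat) =>
      let acc1 := if (i : Int) < p.1 then acc.set i vf else acc
      if p.2 < (i : Int) then acc1.set i vl else acc1) list_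
    some (new_list, (list_.length : Int) - p.2 - 1 + p.1)

-- ===== PORT B =====
-- _fill_front: single forward pass with an accumulator 'out' and a 'pending' counter of
-- leading invalid items; 'if out:' → s.1 ≠ []; [e] * (pending + 1) → List.replicate.
def pvFillFront (lst : List Int) (invalid_item : Int) : Option (List Int × Int) :=
  let st := lst.foldl (fun (s : List Int × Int) e =>
      if s.1 ≠ [] then (s.1 ++ [e], s.2)
      else if e ≠ invalid_item then (List.replicate (s.2 + 1).toNat e, s.2)
      else (s.1, s.2 + 1)) ([], 0)
  if st.1 = [] then none else some st

def fill_list_ends_alt (list_ : List Int) (invalid_item : Int) : Option (List Int × Int) :=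
  match pvFillFront list_ invalid_item with
  | none => none
  | some (f, kf) =>
      match pvFillFront f.reverse invalid_item with
      | none => none  -- unreachable: f is nonempty and contains a valid item
      | some (b, kb) => some (b.reverse, kf + kb)

-- ===== PRECONDITION & SPEC =====
def Spec_fill_list_ends (list_ : List Int) (invalid_item : Int) (out : Option (List Int × Int)) : Prop := out = fill_list_ends_alt list_ invalid_item
instance (list_ : List Int) (invalid_item : Int) (out : Option (List Int × Int)) : Decidable (Spec_fill_list_ends list_ invalid_item out) := by unfold Spec_fill_list_ends; infer_instance

-- ===== CLAIM (what is proved, stated in full; the proofs are below) =====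
def Claim_equal_fill_list_ends : Prop := ∀ (list_ : List Int) (invalid_item : Int), Dom_fill_list_ends list_ invalid_item → Spec_fill_list_ends list_ invalid_item (fill_list_ends list_ invalid_item)

-- ===== LEMMAS AND PROOFS =====

-- A's break-at-first-valid loop is findIdx? shifted by the running index.
theorem pvScanValid_eq (inv : Int) (l : List Int) (i : Nat) :
    pvScanValid inv l i = (l.findIdx? (fun e => e != inv)).map (i + ·) := by
  induction l generalizing i with
  | nil => simp [pvScanValid]
  | cons a t ih =>
      by_cases h : a = inv <;>
        cases hfi : List.findIdx? (fun e => e != inv) t <;>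
          (simp [pvScanValid, h, ih, List.findIdx?_cons, hfi]; try omega)

-- A's first-index computation, given where findIdx? breaks.
theorem idxA_first (l : List Int) (inv : Int) (f0 : Nat)
    (hfind : l.findIdx? (fun e => e != inv) = some f0) :
    (idx_first_last_valid_items l inv).1 = (f0 : Int) := by
  cases l with
  | nil => simp at hfind
  | cons a t =>
      simp only [idx_first_last_valid_items]
      by_cases ha : a = inv
      · rw [if_neg (by simp [PySem.List.pyGet?, PySem.List.pyIdx?, ha])]
        simp [pvScanValid_eq, hfind]
      · have : f0 = 0 := by
          simp [List.findIdx?_cons, ha] at hfind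
          omega
        rw [if_pos (by simp [PySem.List.pyGet?, PySem.List.pyIdx?, ha])]
        simp [this]

-- A's last-index computation, given where findIdx? breaks on the reversed list.
theorem idxA_last (l : List Int) (inv : Int) (r0 : Nat)
    (hrfind : l.reverse.findIdx? (fun e => e != inv) = some r0) :
    (idx_first_last_valid_items l inv).2 = (l.length : Int) - r0 - 1 := by
  cases hrev : l.reverse with
  | nil => rw [hrev] at hrfind; simp at hrfind
  | cons b t =>
      have hne : l ≠ [] := by
        intro h; rw [h] at hrev; simp at hrev
      have hget : PySem.List.pyGet? l (-1) = some b := by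
        have hlen : 1 ≤ l.length := by
          cases l with
          | nil => exact absurd rfl hne
          | cons _ _ => simp
        have : l[l.length - 1]? = some b := by
          have h0 : l.reverse[0]? = some b := by rw [hrev]; rfl
          rw [List.getElem?_reverse (by omega)] at h0
          simpa using h0
        simp only [PySem.List.pyGet?, PySem.List.pyIdx?]
        rw [if_neg (by omega), if_pos (by omega)]
        simpa using this
      rw [hrev] at hrfind
      simp only [idx_first_last_valid_items]
      by_cases hb : b = inv
      · rw [if_neg (by simp [hget, hb])]
        simp [pvScanValid_eq, hrev, hrfind]
      · have : r0 = 0 := by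
          simp [List.findIdx?_cons, hb] at hrfind
          omega
        rw [if_pos (by simp [hget, hb])]
        simp [this]

-- A's copy-then-overwrite loop, prefix form.
theorem fold_fill_aux (f lst vf vl : Int) (l : List Int) (m : Nat) (hm : m ≤ l.length) :
    (List.range m).foldl (fun acc (i : Nat) =>
        let acc1 := if (i : Int) < f then acc.set i vf else acc
        if lst < (i : Int) then acc1.set i vl else acc1) l
      = (l.take m).mapIdx (fun i x => if lst < (i : Int) then vl else if (i : Int) < f then vf else x)
          ++ l.drop m := by
  induction m with
  | zero => simp
  | succ m ih =>
      have hm' : m ≤ l.length := by omega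
      have hlt : m < l.length := by omega
      rw [List.range_succ, List.foldl_append, ih hm']
      have htake : l.take (m+1) = l.take m ++ [l[m]] := by
        rw [← List.take_concat_get hlt]; simp
      have hdrop : l.drop m = l[m] :: l.drop (m+1) := List.drop_eq_getElem_cons hlt
      have hlen : ((l.take m).mapIdx (fun i x => if lst < (i : Int) then vl else if (i : Int) < f then vf else x)).length = m := by
        simp [hm']
      rw [htake, List.mapIdx_concat, hdrop]
      simp only [List.length_take, Nat.min_eq_left hm']
      simp only [List.foldl_cons, List.foldl_nil]
      by_cases h1 : (m : Int) < f <;> by_cases h2 : lst < (m : Int) <;>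
        (simp [h1, h2, hlen, List.append_assoc]) <;> (rw [hdrop, List.set_cons_zero])

-- A's copy-then-overwrite loop computes the pointwise description below.
theorem fold_fill (f lst vf vl : Int) (l : List Int) :
    (List.range l.length).foldl (fun acc (i : Nat) =>
        let acc1 := if (i : Int) < f then acc.set i vf else acc
        if lst < (i : Int) then acc1.set i vl else acc1) l
      = l.mapIdx (fun i x => if lst < (i : Int) then vl else if (i : Int) < f then vf else x) := by
  rw [fold_fill_aux f lst vf vl l l.length le_rfl]; simp

-- B's one-ended pass: loop invariant. After the whole fold the state is ([], length) when every
-- item is invalid, and (replicate f0 l[f0] ++ drop f0 l, f0) when f0 is the first valid index.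
theorem ffront_fold (inv : Int) (l : List Int) :
    l.foldl (fun (s : List Int × Int) e =>
        if s.1 ≠ [] then (s.1 ++ [e], s.2)
        else if e ≠ inv then (List.replicate (s.2 + 1).toNat e, s.2)
        else (s.1, s.2 + 1)) ([], 0)
      = match l.findIdx? (fun e => e != inv) with
        | none => (([] : List Int), (l.length : Int))
        | some f0 => (List.replicate f0 (l.getD f0 0) ++ l.drop f0, (f0 : Int)) := by
  induction l using List.reverseRecOn with
  | nil => simp
  | append_singleton t x ih =>
      rw [List.foldl_append, ih, List.findIdx?_append]
      cases hft : t.findIdx? (fun e => e != inv) with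
      | some f0 =>
          obtain ⟨hf0lt, -, -⟩ := List.findIdx?_eq_some_iff_getElem.mp hft
          have hne : List.replicate f0 (t.getD f0 0) ++ t.drop f0 ≠ [] := by
            simp
            omega
          simp only [List.foldl_cons, List.foldl_nil, Option.some_or]
          rw [if_pos hne]
          have hgd : (t ++ [x]).getD f0 0 = t.getD f0 0 := by
            simp [List.getD, List.getElem?_append_left hf0lt]
          rw [hgd, List.drop_append_of_le_length (by omega)]
          simp [List.append_assoc]
      | none =>
          simp only [List.foldl_cons, List.foldl_nil, Option.none_or]
          rw [if_neg (by simp)]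
          by_cases hx : x = inv
          · simp only [hx]
            rw [if_neg (by simp)]
            simp
          · rw [if_pos (by simpa using hx)]
            simp only [List.findIdx?_cons, List.findIdx?_nil]
            rw [if_pos (by simpa using hx)]
            simp only [Option.map_some, Nat.zero_add]
            have hgd : (t ++ [x]).getD t.length 0 = x := by
              simp [List.getD]
            have htoNat : ((t.length : Int) + 1).toNat = t.length + 1 := by omega
            rw [htoNat, hgd]
            rw [List.drop_append_of_le_length (le_refl _)]
            simp [List.replicate_succ' (n := t.length)]

-- B's one-ended pass, all-invalid case.
theorem ffront_none (inv : Int) (l : List Int)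
    (h : l.findIdx? (fun e => e != inv) = none) :
    pvFillFront l inv = none := by
  unfold pvFillFront
  rw [ffront_fold, h]
  simp

-- B's one-ended pass, first-valid-at-f0 case.
theorem ffront_some (inv : Int) (l : List Int) (f0 : Nat)
    (h : l.findIdx? (fun e => e != inv) = some f0) :
    pvFillFront l inv = some (List.replicate f0 (l.getD f0 0) ++ l.drop f0, (f0 : Int)) := by
  obtain ⟨hf0lt, -, -⟩ := List.findIdx?_eq_some_iff_getElem.mp h
  unfold pvFillFront
  rw [ffront_fold, h]
  simp only []
  rw [if_neg (by simp; omega)]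

-- B's assembled two-pass result (front segment kept by take, back run replicated) equals the
-- pointwise description that A's overwrite loop computes.
theorem segs_eq (l : List Int) (vf vl : Int) (f0 r0 : Nat)
    (hf0 : f0 < l.length) (hr0 : r0 < l.length) (hfL : f0 ≤ l.length - 1 - r0) :
    (List.replicate f0 vf ++ l.drop f0).take (l.length - r0) ++ List.replicate r0 vl
      = l.mapIdx (fun i x => if ((l.length - 1 - r0 : Nat) : Int) < (i : Int) then vl
                             else if (i : Int) < (f0 : Int) then vf else x) := by
  apply List.ext_getElem
  · simp
    omega
  · intro i hi hi'
    simp only [List.getElem_append, List.length_take, List.length_append, List.length_replicate,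
      List.length_drop, List.getElem_take, List.getElem_replicate, List.getElem_mapIdx,
      List.getElem_drop]
    split_ifs <;> first
      | rfl
      | omega
      | (congr 1; omega)

-- ===== VERDICT (by name: the statement is the Claim_ definition above) =====
theorem fill_list_ends_spec : Claim_equal_fill_list_ends := by
  intro l inv _
  unfold Spec_fill_list_ends
  by_cases h1 : l.all (fun e => e == inv) = true
  · -- all invalid: A's guard fires; B's first pass ends with an empty accumulator
    have hnone : l.findIdx? (fun e => e != inv) = none := by
      rw [List.findIdx?_eq_none_iff]
      intro x hx
      have := List.all_eq_true.mp h1 x hx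
      simpa using this
    simp [fill_list_ends, fill_list_ends_alt, h1, ffront_none _ _ hnone]
  by_cases h2 : l.contains inv = false
  · -- no invalid item: A's second guard; both of B's passes replace nothing
    have hmem : inv ∉ l := by simpa using h2
    have hne : l ≠ [] := by
      intro h
      rw [h] at h1
      simp at h1
    have hfind : l.findIdx? (fun e => e != inv) = some 0 := by
      cases l with
      | nil => exact absurd rfl hne
      | cons a t =>
          have : a ≠ inv := fun h => hmem (h ▸ List.mem_cons_self)
          simp [List.findIdx?_cons, this]
    have hrne : l.reverse ≠ [] := by simpa using hne
    have hrfind : l.reverse.findIdx? (fun e => e != inv) = some 0 := by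
      cases hrev : l.reverse with
      | nil => exact absurd hrev hrne
      | cons b t =>
          have hb : b ∈ l := by
            have : b ∈ l.reverse := by rw [hrev]; exact List.mem_cons_self
            simpa using this
          have : b ≠ inv := fun h => hmem (h ▸ hb)
          simp [List.findIdx?_cons, this]
    have hB1 := ffront_some inv l 0 hfind
    simp only [List.replicate_zero, List.nil_append, List.drop_zero, Nat.cast_zero] at hB1
    have hB2 := ffront_some inv l.reverse 0 hrfind
    simp only [List.replicate_zero, List.nil_append, List.drop_zero, Nat.cast_zero] at hB2
    simp [fill_list_ends, fill_list_ends_alt, h1, hmem, hB1, hB2]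
  have hmem : inv ∈ l := by simpa using h2
  -- main case: some item is invalid, some item is valid
  have hany : l.any (fun e => e != inv) = true := by
    rw [List.all_eq_true] at h1
    push Not at h1
    obtain ⟨x, hx, hxne⟩ := h1
    rw [List.any_eq_true]
    exact ⟨x, hx, by simpa using hxne⟩
  obtain ⟨f0, hfind⟩ : ∃ f0, l.findIdx? (fun e => e != inv) = some f0 := by
    have h := List.findIdx?_isSome (xs := l) (p := fun e => e != inv)
    rw [hany] at h
    exact Option.isSome_iff_exists.mp h
  obtain ⟨r0, hrfind⟩ : ∃ r0, l.reverse.findIdx? (fun e => e != inv) = some r0 := by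
    have h := List.findIdx?_isSome (xs := l.reverse) (p := fun e => e != inv)
    rw [List.any_reverse, hany] at h
    exact Option.isSome_iff_exists.mp h
  obtain ⟨hf0lt, hpf, hfmin⟩ := List.findIdx?_eq_some_iff_getElem.mp hfind
  obtain ⟨hr0lt', hpr, hrmin⟩ := List.findIdx?_eq_some_iff_getElem.mp hrfind
  have hr0lt : r0 < l.length := by simpa using hr0lt'
  have hLlt : l.length - 1 - r0 < l.length := by omega
  have hLval : l[l.length - 1 - r0]'hLlt ≠ inv := by
    have := hpr
    rw [List.getElem_reverse] at this
    simpa using this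
  have hfL : f0 ≤ l.length - 1 - r0 := by
    by_contra hcon
    push Not at hcon
    have := hfmin (l.length - 1 - r0) (by omega)
    simp at this
    exact hLval this
  -- A's side: indices, then the overwrite loop as a pointwise map
  have hA1 := idxA_first l inv f0 hfind
  have hA2 := idxA_last l inv r0 hrfind
  -- B's side: the front pass
  have hgdf : l.getD f0 0 = l[f0] := List.getD_eq_getElem l 0 hf0lt
  have hB1 := ffront_some inv l f0 hfind
  rw [hgdf] at hB1
  -- facts about F, the output of B's front pass
  have hFlen : (List.replicate f0 (l[f0]'hf0lt) ++ l.drop f0).length = l.length := by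
    simp
    omega
  have hFget : ∀ i (h : i < l.length), f0 ≤ i →
      (List.replicate f0 (l[f0]'hf0lt) ++ l.drop f0)[i]'(by rw [hFlen]; exact h) = l[i] := by
    intro i h hfi
    rw [List.getElem_append]
    rw [dif_neg (by simp; omega)]
    rw [List.getElem_drop]
    congr 1
    simp
    omega
  -- B's back pass breaks at the same reversed index r0 as A's scan of reversed l
  have hrB : (List.replicate f0 (l[f0]'hf0lt) ++ l.drop f0).reverse.findIdx?
      (fun e => e != inv) = some r0 := by
    rw [List.findIdx?_eq_some_iff_getElem]
    refine ⟨by simp; omega, ?_, ?_⟩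
    · rw [List.getElem_reverse]
      simp only [hFlen]
      rw [hFget (l.length - 1 - r0) hLlt hfL]
      simpa using hLval
    · intro j hj
      rw [List.getElem_reverse]
      simp only [hFlen]
      rw [hFget (l.length - 1 - j) (by omega) (by omega)]
      have := hrmin j (by omega)
      rw [List.getElem_reverse] at this
      simpa using this
  have hgdr : (List.replicate f0 (l[f0]'hf0lt) ++ l.drop f0).reverse.getD r0 0
      = l[l.length - 1 - r0]'hLlt := by
    rw [List.getD_eq_getElem _ 0 (by simp; omega)]
    rw [List.getElem_reverse]
    simp only [hFlen]
    exact hFget (l.length - 1 - r0) hLlt hfL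
  have hB2 := ffront_some inv _ r0 hrB
  rw [hgdr] at hB2
  -- assemble both sides
  simp only [fill_list_ends, fill_list_ends_alt, hA1, hA2, hB1, hB2]
  rw [if_neg h1, if_neg h2]
  have hvf : (PySem.List.pyGet? l ((f0 : Nat) : Int)).getD 0 = l[f0] := by
    rw [PySem.List.pyGet?_natCast, List.getElem?_eq_getElem hf0lt, Option.getD_some]
  have e1 : (l.length : Int) - (r0 : Int) - 1 = ((l.length - 1 - r0 : Nat) : Int) := by omega
  have hvl : (PySem.List.pyGet? l ((l.length : Int) - (r0 : Int) - 1)).getD 0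
      = l[l.length - 1 - r0]'hLlt := by
    rw [e1, PySem.List.pyGet?_natCast, List.getElem?_eq_getElem hLlt, Option.getD_some]
  rw [hvf, hvl, e1, fold_fill]
  rw [List.reverse_append, List.reverse_replicate, List.drop_reverse, List.reverse_reverse,
    hFlen]
  rw [segs_eq l (l[f0]'hf0lt) (l[l.length - 1 - r0]'hLlt) f0 r0 hf0lt hr0lt hfL]
  refine congrArg some (Prod.ext rfl ?_)
  simp
  omega
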